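-- pv_equiv track=rewrite | github.com/pisppus/pipGUI | tools/fonts/script/fontgen.py | _best_grid
-- ===== SOURCE A (Python) =====
-- import math
--
-- def _best_grid(n: int):
--     best_cols = 1
--     best_rows = n
--     best_area = best_cols * best_rows
--     best_aspect = abs(best_cols - best_rows)
--     for cols in range(1, n + 1):
--         rows = int(math.ceil(n / cols))
--         area = cols * rows
--         aspect = abs(cols - rows)
--         if area < best_area or (area == best_area and aspect < best_aspect):
--             best_area = area
--             best_aspect = aspect
--             best_cols = cols
--             best_rows = rows
--     return best_cols, best_rows
-- ===== SOURCE B (Python) =====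
-- def _best_grid(n: int):
--     # O(sqrt(n)): enumerate only the first column-count of each block on which
--     # ceil(n/cols) is constant; later columns of a block have strictly larger area.
--     if n <= 1:
--         return 1, n
--     best_cols, best_rows = 1, n
--     best_area, best_aspect = n, n - 1
--     cols = 1
--     while cols <= n:
--         rows = -(-n // cols)  # ceil division
--         area = cols * rows
--         aspect = abs(cols - rows)
--         if area < best_area or (area == best_area and aspect < best_aspect):
--             best_cols, best_rows = cols, rows
--             best_area, best_aspect = area, aspect
--         if rows == 1:
--             break
--         cols = (n - 1) // (rows - 1) + 1  # first cols where ceil(n/cols) < rows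
--     return best_cols, best_rows
-- ===== Notes on version B (the rewrite author's own statement) =====
-- stated objective: faster
-- what changed: Instead of scanning every cols in 1..n, B jumps between the O(sqrt n) blocks of cols on which ceil(n/cols) is constant, evaluating only the first cols of each block (later ones have strictly larger area, so they can never win A's strict lexicographic comparison).
import Mathlib
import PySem

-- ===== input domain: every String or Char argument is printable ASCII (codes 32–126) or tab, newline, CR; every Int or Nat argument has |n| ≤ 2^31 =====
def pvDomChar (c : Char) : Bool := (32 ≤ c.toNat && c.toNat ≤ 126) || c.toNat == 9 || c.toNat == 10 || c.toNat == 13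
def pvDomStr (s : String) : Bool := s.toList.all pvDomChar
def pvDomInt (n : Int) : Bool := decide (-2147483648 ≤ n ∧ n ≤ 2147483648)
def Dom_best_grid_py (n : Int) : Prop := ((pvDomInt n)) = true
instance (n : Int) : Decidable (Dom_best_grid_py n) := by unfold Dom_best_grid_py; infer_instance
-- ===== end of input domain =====

-- B replaces A's scan over every cols in 1..n by a jump over the O(√n) blocks of
-- constant ceil(n/cols), testing only the first cols of each block (objective: faster).

-- ===== PORT A =====
-- loop body of A: keep the best (cols, rows, area, aspect) seen so far
def bestStep (n : Int) (s : Int × Int × Int × Int) (cols : Int) : Int × Int × Int × Int :=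
  let rows := -(PySem.Int.floordiv (-n) cols)  -- int(math.ceil(n / cols)); exact for |n| ≤ 2^31
  let area := cols * rows
  let aspect := |cols - rows|
  if area < s.2.2.1 ∨ (area = s.2.2.1 ∧ aspect < s.2.2.2) then (cols, rows, area, aspect) else s

def best_grid_py (n : Int) : Int × Int :=
  let s := (PySem.List.pyRange 1 (n + 1) 1).foldl (bestStep n) (1, n, 1 * n, |(1 : Int) - n|)
  (s.1, s.2.1)

-- ===== PORT B =====
-- the while-loop of Source B; the final `else s'` only makes the recursion total — from
-- best_grid_py_alt the jump target is provably strictly larger, so it is never taken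
def bestLoop (n : Int) (s : Int × Int × Int × Int) (cols : Int) : Int × Int × Int × Int :=
  if hc : cols ≤ n then
    let rows := -(PySem.Int.floordiv (-n) cols)  -- -(-n // cols): ceil division
    let area := cols * rows
    let aspect := |cols - rows|
    let s' := if area < s.2.2.1 ∨ (area = s.2.2.1 ∧ aspect < s.2.2.2) then (cols, rows, area, aspect) else s
    if rows = 1 then s'
    else
      let cols' := PySem.Int.floordiv (n - 1) (rows - 1) + 1  -- first cols with smaller ceil
      if h : cols < cols' then bestLoop n s' cols' else s'
  else s
termination_by (n + 1 - cols).toNat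
decreasing_by
  have h2 : cols < PySem.Int.floordiv (n - 1) (-PySem.Int.floordiv (-n) cols - 1) + 1 := h
  omega

def best_grid_py_alt (n : Int) : Int × Int :=
  if n ≤ 1 then (1, n)
  else
    let s := bestLoop n (1, n, n, n - 1) 1
    (s.1, s.2.1)

-- ===== PRECONDITION & SPEC =====
def Spec_best_grid_py (n : Int) (out : Int × Int) : Prop := out = best_grid_py_alt n
instance (n : Int) (out : Int × Int) : Decidable (Spec_best_grid_py n out) := by unfold Spec_best_grid_py; infer_instance

-- ===== CLAIM (what is proved, stated in full; the proofs are below) =====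
def Claim_equal_best_grid_py : Prop := ∀ (n : Int), Dom_best_grid_py n → Spec_best_grid_py n (best_grid_py n)

-- ===== LEMMAS AND PROOFS =====

-- ceiling division bracket: rows = ceil(n/c) satisfies (rows-1)*c < n ≤ rows*c
theorem ceil_bracket (n c : Int) (hc : 0 < c) :
    (-(PySem.Int.floordiv (-n) c) - 1) * c < n ∧ n ≤ -(PySem.Int.floordiv (-n) c) * c :=
  (PySem.Int.neg_floordiv_neg_eq_iff_of_pos hc).mp rfl

-- the candidate at c never makes the best area exceed c * ceil(n/c)
theorem step_area (n : Int) (s : Int × Int × Int × Int) (c : Int) :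
    (bestStep n s c).2.2.1 ≤ c * -(PySem.Int.floordiv (-n) c) := by
  unfold bestStep
  dsimp only
  split
  · simp
  · rename_i hcond
    push Not at hcond
    omega

-- a candidate with strictly larger area than the current best never updates the state
theorem step_noop (n : Int) (s : Int × Int × Int × Int) (c : Int)
    (h : s.2.2.1 < c * -(PySem.Int.floordiv (-n) c)) : bestStep n s c = s := by
  unfold bestStep
  dsimp only
  split
  · rename_i hcond
    rcases hcond with h1 | ⟨h1, _⟩ <;> omega
  · rfl

-- inside a block of constant ceil(n/·), the fold past the first element is a no-op
theorem collapse (n c e r : Int) (hc : 1 ≤ c) (hr : 1 ≤ r)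
    (hblock : ∀ y, c ≤ y → y ≤ e → -(PySem.Int.floordiv (-n) y) = r) :
    ∀ (k : Nat) (x : Int) (t : Int × Int × Int × Int), c < x → (e + 1 - x).toNat = k →
      t.2.2.1 ≤ c * r →
      List.foldl (bestStep n) t (PySem.List.pyRange x (e + 1) 1) = t := by
  intro k
  induction k with
  | zero =>
    intro x t hx hk ht
    rw [PySem.List.pyRange_one_eq_nil (by omega)]
    rfl
  | succ m ih =>
    intro x t hx hk ht
    by_cases hxe : x < e + 1
    · rw [PySem.List.pyRange_one_cons hxe, List.foldl_cons]
      have hry : -(PySem.Int.floordiv (-n) x) = r := hblock x (by omega) (by omega)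
      have hlt : t.2.2.1 < x * -(PySem.Int.floordiv (-n) x) := by
        rw [hry]; nlinarith
      rw [step_noop n t x hlt]
      exact ih (x + 1) t (by omega) (by omega) ht
    · rw [PySem.List.pyRange_one_eq_nil (by omega)]
      rfl

-- main loop correspondence: A's fold from c equals B's block loop from c
theorem main_loop (n : Int) (hn : 2 ≤ n) :
    ∀ (k : Nat) (c : Int) (s : Int × Int × Int × Int), 1 ≤ c → c ≤ n → (n - c).toNat = k →
      List.foldl (bestStep n) s (PySem.List.pyRange c (n + 1) 1) = bestLoop n s c := by
  intro k
  induction k using Nat.strong_induction_on with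
  | _ k ih =>
    intro c s hc1 hcn hk
    set r := -(PySem.Int.floordiv (-n) c) with hrdef
    obtain ⟨hb1, hb2⟩ := ceil_bracket n c (by omega)
    have hr1 : 1 ≤ r := by nlinarith
    rw [bestLoop.eq_def]
    rw [dif_pos hcn]
    dsimp only
    rw [← hrdef]
    by_cases hr : r = 1
    · -- last block: ceil = 1 forces c = n
      have hcn' : c = n := by nlinarith
      subst hcn'
      rw [if_pos hr, PySem.List.pyRange_one_singleton, List.foldl_cons, List.foldl_nil]
      rfl
    · rw [if_neg hr]
      have hr2 : 2 ≤ r := by omega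
      set e := PySem.Int.floordiv (n - 1) (r - 1) with hedef
      have he1 : e * (r - 1) ≤ n - 1 :=
        (PySem.Int.le_floordiv_iff_mul_le (by omega)).mp (le_of_eq hedef)
      have hce : c ≤ e := by
        rw [hedef, PySem.Int.le_floordiv_iff_mul_le (by omega)]
        nlinarith
      have hen : e ≤ n - 1 := by
        have := (PySem.Int.floordiv_lt_iff_lt_mul (a := n - 1) (b := r - 1) (q := n) (by omega)).mpr
          (by nlinarith)
        omega
      have hguard : c < e + 1 := by omega
      rw [dif_pos hguard]
      have hblock : ∀ y, c ≤ y → y ≤ e → -(PySem.Int.floordiv (-n) y) = r := by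
        intro y hy1 hy2
        rw [PySem.Int.neg_floordiv_neg_eq_iff_of_pos (by omega)]
        constructor
        · nlinarith
        · nlinarith
      rw [PySem.List.pyRange_one_append c (e + 1) (n + 1) (by omega) (by omega),
          List.foldl_append,
          PySem.List.pyRange_one_cons (by omega), List.foldl_cons]
      have hcoll := collapse n c e r hc1 hr1 hblock (e + 1 - (c + 1)).toNat (c + 1)
        (bestStep n s c) (by omega) rfl (step_area n s c)
      rw [hcoll]
      have hrec := ih (n - (e + 1)).toNat (by omega) (e + 1) (bestStep n s c)
        (by omega) (by omega) rfl
      rw [hrec]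
      rfl

-- ===== VERDICT (by name: the statement is the Claim_ definition above) =====
theorem best_grid_py_spec : Claim_equal_best_grid_py := by
  intro n _
  unfold Spec_best_grid_py best_grid_py best_grid_py_alt
  by_cases hn : n ≤ 1
  · rw [if_pos hn]
    by_cases hn0 : n ≤ 0
    · rw [PySem.List.pyRange_one_eq_nil (by omega)]
      rfl
    · have : n = 1 := by omega
      subst this
      rw [PySem.List.pyRange_one_singleton, List.foldl_cons, List.foldl_nil]
      rfl
  · rw [if_neg hn]
    have hinit : ((1 : Int), n, 1 * n, |(1 : Int) - n|) = ((1 : Int), n, n, n - 1) := by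
      have : |(1 : Int) - n| = n - 1 := by rw [abs_of_nonpos (by omega)]; ring
      rw [this]; ring_nf
    rw [hinit, main_loop n (by omega) (n - 1).toNat 1 _ (by omega) (by omega) (by omega)]
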